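-- pv_equiv track=rewrite | github.com/aestream/faery | python/faery/cli/process.py | split_on_keywords
-- ===== SOURCE A (Python) =====
-- import typing
--
-- KEYWORDS: set[str] = {"input", "filter", "output"}
--
-- def split_on_keywords(arguments: list[str]) -> typing.Iterator[list[str]]:
--     subcommand_start_index = 0
--     for index, argument in enumerate(arguments):
--         if index > 0:
--             if argument in KEYWORDS:
--                 yield arguments[subcommand_start_index:index]
--                 subcommand_start_index = index
--     yield arguments[subcommand_start_index:]
-- ===== SOURCE B (Python) =====
-- import typing
--
-- KEYWORDS: set[str] = {"input", "filter", "output"}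
--
-- def split_on_keywords(arguments: list[str]) -> typing.Iterator[list[str]]:
--     bounds = [0] + [i for i in range(1, len(arguments)) if arguments[i] in KEYWORDS] + [len(arguments)]
--     for a, b in zip(bounds, bounds[1:]):
--         yield arguments[a:b]
-- ===== Notes on version B (the rewrite author's own statement) =====
-- stated objective: alternative
-- what changed: B first computes the full list of keyword boundary indices, then emits the slices between consecutive bounds in a second pass, instead of A's single interleaved loop tracking a running start index.
import Mathlib
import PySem

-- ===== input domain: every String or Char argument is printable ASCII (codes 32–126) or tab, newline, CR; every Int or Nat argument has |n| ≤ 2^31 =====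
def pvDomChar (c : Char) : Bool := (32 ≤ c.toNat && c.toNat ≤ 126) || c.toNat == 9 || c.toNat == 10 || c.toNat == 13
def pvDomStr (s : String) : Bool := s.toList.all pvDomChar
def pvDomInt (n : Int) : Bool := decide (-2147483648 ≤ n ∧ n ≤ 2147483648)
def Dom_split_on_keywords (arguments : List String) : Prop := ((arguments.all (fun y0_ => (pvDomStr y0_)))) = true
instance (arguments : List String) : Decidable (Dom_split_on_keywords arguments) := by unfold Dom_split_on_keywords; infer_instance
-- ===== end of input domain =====

-- B differs from A by a different decomposition: it first collects all keyword boundary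
-- indices into a bounds table and then emits the slices between consecutive bounds,
-- instead of A's single interleaved loop tracking a running start index.

-- KEYWORDS = {"input", "filter", "output"}
def pvKEYWORDS : PySem.Set String := PySem.Set.ofList ["input", "filter", "output"]

-- ===== PORT A =====
-- the loop body of A: at (index, argument), if index > 0 and argument in KEYWORDS,
-- yield arguments[start:index] (append to the accumulated output) and set start := index
def pvStepA (arguments : List String) (st : Int × List (List String))
    (p : Int × String) : Int × List (List String) :=
  if 0 < p.1 then
    if p.2 ∈ pvKEYWORDS then
      (p.1, st.2 ++ [PySem.List.slice arguments (some st.1) (some p.1)])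
    else st
  else st

-- the final 'yield arguments[subcommand_start_index:]'
def pvFinishA (arguments : List String) (st : Int × List (List String)) : List (List String) :=
  st.2 ++ [PySem.List.slice arguments (some st.1) none]

def split_on_keywords (arguments : List String) : List (List String) :=
  pvFinishA arguments ((PySem.List.enumerate arguments).foldl (pvStepA arguments) (0, []))

-- ===== PORT B =====
-- 'for a, b in zip(bounds, bounds[1:]): yield arguments[a:b]'
def pvEmitSlices (arguments : List String) (bounds : List Int) : List (List String) :=
  (bounds.zip (PySem.List.slice bounds (some 1) none)).map
    (fun p => PySem.List.slice arguments (some p.1) (some p.2))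

-- bounds = [0] + [i for i in range(1, len(arguments)) if arguments[i] in KEYWORDS] + [len(arguments)]
def split_on_keywords_alt (arguments : List String) : List (List String) :=
  pvEmitSlices arguments
    (0 :: (PySem.List.pyRange 1 (arguments.length : Int) 1).filter
        (fun i => PySem.List.pyGetD arguments i "" ∈ pvKEYWORDS)
      ++ [(arguments.length : Int)])

-- ===== PRECONDITION & SPEC =====
def Spec_split_on_keywords (arguments : List String) (out : List (List String)) : Prop := out = split_on_keywords_alt arguments
instance (arguments : List String) (out : List (List String)) : Decidable (Spec_split_on_keywords arguments out) := by unfold Spec_split_on_keywords; infer_instance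

-- ===== CLAIM (what is proved, stated in full; the proofs are below) =====
def Claim_equal_split_on_keywords : Prop := ∀ (arguments : List String), Dom_split_on_keywords arguments → Spec_split_on_keywords arguments (split_on_keywords arguments)

-- ===== LEMMAS AND PROOFS =====

lemma emit_cons2 (arguments : List String) (a b : Int) (rest : List Int) :
    pvEmitSlices arguments (a :: b :: rest)
      = PySem.List.slice arguments (some a) (some b) :: pvEmitSlices arguments (b :: rest) := by
  simp [pvEmitSlices, PySem.List.slice_from]

-- slicing to the end = slicing to the length, for a nonnegative start
lemma slice_none_eq_slice_len (arguments : List String) (s : Int) (hs : 0 ≤ s) :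
    PySem.List.slice arguments (some s) none
      = PySem.List.slice arguments (some s) (some (arguments.length : Int)) := by
  rw [PySem.List.slice_toNat arguments hs (by positivity), PySem.List.slice_from arguments hs]
  refine (List.take_of_length_le ?_).symm
  simp

-- the main invariant: folding A's step over any list of positive indices, then emitting
-- the final tail slice, equals the accumulated output followed by B's slices over the
-- bounds table (current start :: keyword indices among the list :: length)
lemma core (arguments : List String) (is : List Int) (start : Int)
    (acc : List (List String))
    (hpos : ∀ i ∈ is, 0 < i) (hs : 0 ≤ start) :
    pvFinishA arguments
      (is.foldl (fun st i => pvStepA arguments st (i, PySem.List.pyGetD arguments i "")) (start, acc))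
    = acc ++ pvEmitSlices arguments
        (start :: (is.filter (fun i => PySem.List.pyGetD arguments i "" ∈ pvKEYWORDS))
          ++ [(arguments.length : Int)]) := by
  induction is generalizing start acc with
  | nil =>
      simp [pvFinishA, pvEmitSlices, PySem.List.slice_from,
        slice_none_eq_slice_len arguments start hs]
  | cons i is ih =>
      have hi : 0 < i := hpos i (by simp)
      by_cases hk : PySem.List.pyGetD arguments i "" ∈ pvKEYWORDS
      · have hstep : pvStepA arguments (start, acc) (i, PySem.List.pyGetD arguments i "")
            = (i, acc ++ [PySem.List.slice arguments (some start) (some i)]) := by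
          simp [pvStepA, hi, hk]
        rw [List.foldl_cons, hstep, List.filter_cons]
        simp only [hk, decide_true, if_true, List.cons_append, emit_cons2]
        rw [ih i (acc ++ [PySem.List.slice arguments (some start) (some i)])
              (fun j hj => hpos j (by simp [hj])) (le_of_lt hi)]
        simp
      · have hstep : pvStepA arguments (start, acc) (i, PySem.List.pyGetD arguments i "")
            = (start, acc) := by
          simp [pvStepA, hi, hk]
        rw [List.foldl_cons, hstep, List.filter_cons]
        simp only [hk, decide_false]
        exact ih start acc (fun j hj => hpos j (by simp [hj])) hs

-- ===== VERDICT (by name: the statement is the Claim_ definition above) =====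
theorem split_on_keywords_spec : Claim_equal_split_on_keywords := by
  intro arguments _
  unfold Spec_split_on_keywords split_on_keywords split_on_keywords_alt
  cases arguments with
  | nil => decide
  | cons x xs =>
      rw [PySem.List.enumerate_eq_map_pyRange (x :: xs) "", List.foldl_map]
      simp only [PySem.List.len_eq]
      have hn : (0 : Int) < ((x :: xs).length : Int) := by
        simp only [List.length_cons]; positivity
      rw [PySem.List.pyRange_one_cons hn, List.foldl_cons]
      have h0 : pvStepA (x :: xs) (0, []) (0, PySem.List.pyGetD (x :: xs) 0 "") = (0, []) := by
        simp [pvStepA]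
      rw [h0]
      exact core (x :: xs) (PySem.List.pyRange 1 ((x :: xs).length : Int) 1) 0 []
        (fun i hi => (PySem.List.mem_pyRange_one.mp hi).1) le_rfl
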